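-- pv_equiv track=rewrite | github.com/Akito-UzukiP/simple_gakuen_idolmaster | utils/cards_future.py | print_cards
-- ===== SOURCE A (Python) =====
-- import unicodedata
--
-- def get_display_width(text):
--     """
--     计算字符串的显示宽度，考虑全角和半角字符。
--     """
--     width = 0
--     for char in text:
--         if unicodedata.east_asian_width(char) in ('F', 'W', 'A'):
--             width += 2
--         else:
--             width += 1
--     return width
--
-- def print_cards(cards, card_per_line: int = 3, max_symbols_per_line: int = 50):
--     """
--     对于多张卡牌，漂亮地打印出来
--     """
--     card_strs = [str(card) for card in cards]
--     card_strs_split = [card_str.split("\n") for card_str in card_strs]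
--
--     # Ensure each card is within max_symbols_per_line
--     for idx, card_split in enumerate(card_strs_split):
--         card_strs_split[idx] = [line[:max_symbols_per_line] for line in card_split]
--
--     max_length = max([max([get_display_width(line) for line in card_str_split]) for card_str_split in card_strs_split])
--     max_lines = max([len(card_str_split) for card_str_split in card_strs_split])
--
--     output_str = "+" + ("-" * (max_length + 2) + "+") * card_per_line + "\n"
--     printed_cards = 0
--
--     while printed_cards < len(cards):
--         for i in range(max_lines):
--             output_str += "|"
--             for j in range(card_per_line):
--                 card_idx = printed_cards + j
--                 if card_idx < len(cards):
--                     if i < len(card_strs_split[card_idx]):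
--                         line = card_strs_split[card_idx][i]
--                         display_width = get_display_width(line)
--                         output_str += " " + line
--                         output_str += " " * (max_length - display_width + 1)
--                     else:
--                         output_str += " " * (max_length + 2)
--                 else:
--                     output_str += " " * (max_length + 2)
--                 output_str += "|"
--             output_str += "\n"
--         output_str += "+" + ("-" * (max_length + 2) + "+") * card_per_line + "\n"
--         printed_cards += card_per_line
--
--     return output_str
-- ===== SOURCE B (Python) =====
-- import unicodedata
--
-- def get_display_width(text):
--     width = 0
--     for char in text:
--         if unicodedata.east_asian_width(char) in ('F', 'W', 'A'):
--             width += 2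
--         else:
--             width += 1
--     return width
--
-- def print_cards(cards, card_per_line: int = 3, max_symbols_per_line: int = 50):
--     """Layout-combinator style: pad each card into a fixed rectangle, place rectangles
--     side by side with zip(*...) transposition, stack the strips between border lines."""
--     blocks = [[line[:max_symbols_per_line] for line in str(c).split("\n")]
--               for c in cards]
--     max_length = max(get_display_width(l) for b in blocks for l in b)
--     max_lines = max(len(b) for b in blocks)
--
--     def rect(b):
--         cells = [" " + l + " " * (max_length - get_display_width(l) + 1) for l in b]
--         return cells + [" " * (max_length + 2)] * (max_lines - len(cells))
--
--     blank_rect = [" " * (max_length + 2)] * max_lines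
--
--     def hcat(rs):
--         return ["|".join([""] + list(row) + [""]) for row in zip(*rs)]
--
--     border = "+" + ("-" * (max_length + 2) + "+") * card_per_line
--     rects = [rect(b) for b in blocks]
--     lines = [border]
--     for s in range(0, len(cards), card_per_line):
--         chunk = rects[s:s + card_per_line]
--         lines += hcat(chunk + [blank_rect] * (card_per_line - len(chunk)))
--         lines.append(border)
--     return "\n".join(lines) + "\n"
-- ===== Notes on version B (the rewrite author's own statement) =====
-- stated objective: alternative
-- what changed: B is built from layout combinators: each card becomes a fixed-size padded rectangle of lines, rectangles are placed side by side via zip(*...) transposition and string joins, and the page is a list of lines assembled with one final newline-join, instead of A's while/for/for index loops that bounds-check and concatenate cell by cell onto a growing string.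
-- outside the precondition, e.g. on print_cards([], 3, 50): A raises ValueError, B raises ValueError
import Mathlib
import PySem

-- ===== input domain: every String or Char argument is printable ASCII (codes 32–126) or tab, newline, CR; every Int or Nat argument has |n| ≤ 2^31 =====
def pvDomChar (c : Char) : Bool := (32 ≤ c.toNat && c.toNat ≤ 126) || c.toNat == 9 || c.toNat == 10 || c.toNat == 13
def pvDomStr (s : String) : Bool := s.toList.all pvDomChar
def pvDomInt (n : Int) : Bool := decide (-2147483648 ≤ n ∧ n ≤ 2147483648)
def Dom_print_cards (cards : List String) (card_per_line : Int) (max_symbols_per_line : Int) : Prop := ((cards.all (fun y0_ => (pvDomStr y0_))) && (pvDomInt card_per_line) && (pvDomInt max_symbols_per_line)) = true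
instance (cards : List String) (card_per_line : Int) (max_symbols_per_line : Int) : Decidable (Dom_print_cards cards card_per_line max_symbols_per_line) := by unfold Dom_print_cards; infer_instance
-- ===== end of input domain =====

-- B builds the grid with layout combinators: each card is padded into a fixed rectangle of
-- lines, rectangles are placed side by side by zip(*)-transposition and joined, and the whole
-- page is assembled as a line list joined with newlines — replacing A's bounds-checked
-- index loops that concatenate cell by cell onto one growing string ("alternative" objective,
-- same asymptotic cost). Return-value equivalence only; neither program mutates its arguments.

-- ===== PORT A =====
-- shared module helper: get_display_width.  east_asian_width(c) ∈ ('F','W','A') is false for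
-- every character admitted by Dom_print_cards (printable ASCII + tab/newline/CR), so this
-- predicate is exact on the stated domain.
def pvWide (c : Char) : Bool := 128 ≤ c.toNat
def pvGDW (s : List Char) : Int := s.foldl (fun w c => w + (if pvWide c then 2 else 1)) 0
-- " " * n  and A's "+---+---+\n" border line
def pvSpaces (n : Int) : List Char := PySem.List.pyRepeat [' '] n
def pvBorder (maxLen cpl : Int) : List Char :=
  '+' :: (PySem.List.pyRepeat (PySem.List.pyRepeat ['-'] (maxLen + 2) ++ ['+']) cpl) ++ ['\n']

-- the body of A's innermost `for j in range(card_per_line)` iteration (one cell plus checks)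
def pvCellA (split : List (List (List Char))) (n maxLen printed j i : Int) : List Char :=
  if printed + j < n then
    let card := (PySem.List.pyGet? split (printed + j)).getD []
    if i < PySem.List.len card then
      let line := (PySem.List.pyGet? card i).getD []
      (' ' :: line) ++ pvSpaces (maxLen - pvGDW line + 1)
    else pvSpaces (maxLen + 2)
  else pvSpaces (maxLen + 2)

-- one iteration of A's while-loop body: `for i in range(max_lines): … for j in range(card_per_line): …`
def pvChunkA (split : List (List (List Char))) (n maxLen maxLines cpl printed : Int)
    (acc : List Char) : List Char :=
  (PySem.List.pyRange 0 maxLines 1).foldl (fun acc i =>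
    ((PySem.List.pyRange 0 cpl 1).foldl
        (fun acc j => acc ++ pvCellA split n maxLen printed j i ++ ['|'])
        (acc ++ ['|'])) ++ ['\n']) acc

-- A's `while printed_cards < len(cards)` loop.  Python diverges when card_per_line ≤ 0 and
-- cards ≠ []; the `0 < cpl` conjunct only makes the recursion total there (outside Pre_).
def pvLoopA (split : List (List (List Char))) (n maxLen maxLines cpl printed : Int)
    (acc : List Char) : List Char :=
  if _h : printed < n ∧ 0 < cpl then
    pvLoopA split n maxLen maxLines cpl (printed + cpl)
      (pvChunkA split n maxLen maxLines cpl printed acc ++ pvBorder maxLen cpl)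
  else acc
  termination_by (n - printed).toNat
  decreasing_by omega

def print_cards (cards : List String) (card_per_line : Int) (max_symbols_per_line : Int) : String :=
  let card_strs := cards.map String.toList
  let split0 := card_strs.map (fun s => PySem.Chars.splitOn s ['\n'])
  let split := split0.map (fun b => b.map (fun l => PySem.List.slice l none (some max_symbols_per_line)))
  let maxLen := (PySem.List.max?
      (split.map (fun b => (PySem.List.max? (b.map pvGDW) (fun x => x)).getD 0))
      (fun x => x)).getD 0
  let maxLines := (PySem.List.max? (split.map (fun b => PySem.List.len b)) (fun x => x)).getD 0
  String.ofList
    (pvLoopA split (PySem.List.len cards) maxLen maxLines card_per_line 0 (pvBorder maxLen card_per_line))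

-- ===== PORT B =====
-- one padded cell: " " + line + " " * (max_length - get_display_width(line) + 1)
def pvPadLine (maxLen : Int) (l : List Char) : List Char :=
  (' ' :: l) ++ pvSpaces (maxLen - pvGDW l + 1)

-- B's border has no trailing newline: newlines come from the final "\n".join
def pvBorderB (maxLen cpl : Int) : List Char :=
  '+' :: PySem.List.pyRepeat (PySem.List.pyRepeat ['-'] (maxLen + 2) ++ ['+']) cpl

-- Python's zip(*rs): take heads while every list is nonempty
def pvZipStar (rs : List (List (List Char))) : List (List (List Char)) :=
  if h : rs ≠ [] ∧ ∀ r ∈ rs, r ≠ [] then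
    (rs.map (fun r => r.headD [])) :: pvZipStar (rs.map List.tail)
  else []
  termination_by (rs.headD []).length
  decreasing_by
    obtain ⟨h1, h2⟩ := h
    cases rs with
    | nil => exact absurd rfl h1
    | cons r t =>
      have hr := h2 r (by simp)
      cases r with
      | nil => exact absurd rfl hr
      | cons a as => simp

def print_cards_alt (cards : List String) (card_per_line : Int) (max_symbols_per_line : Int) : String :=
  let blocks := cards.map (fun card =>
    (PySem.Chars.splitOn card.toList ['\n']).map
      (fun l => PySem.List.slice l none (some max_symbols_per_line)))
  let maxLen := (PySem.List.max? (blocks.flatMap (fun b => b.map pvGDW)) (fun x => x)).getD 0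
  let maxLines := (PySem.List.max? (blocks.map (fun b => PySem.List.len b)) (fun x => x)).getD 0
  let blankRect := PySem.List.pyRepeat [pvSpaces (maxLen + 2)] maxLines
  let border := pvBorderB maxLen card_per_line
  let rects := blocks.map (fun b =>
    b.map (pvPadLine maxLen) ++ PySem.List.pyRepeat [pvSpaces (maxLen + 2)] (maxLines - PySem.List.len b))
  let lines := (PySem.List.pyRange 0 (PySem.List.len cards) card_per_line).foldl
    (fun lines s =>
      let chunk := PySem.List.slice rects (some s) (some (s + card_per_line))
      (lines ++ (pvZipStar (chunk ++ PySem.List.pyRepeat [blankRect] (card_per_line - PySem.List.len chunk))).map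
          (fun row => PySem.Chars.join ['|'] ([[]] ++ row ++ [[]]))) ++ [border])
    [border]
  String.ofList (PySem.Chars.join ['\n'] lines ++ ['\n'])

-- ===== PRECONDITION & SPEC =====
-- Pre_ excludes exactly the inputs on which A does not return: cards = [] (max() of an empty
-- list raises ValueError, in B too) and card_per_line ≤ 0 (A's while-loop never terminates).
def Pre_print_cards (cards : List String) (card_per_line : Int) (max_symbols_per_line : Int) : Prop :=
  cards ≠ [] ∧ 1 ≤ card_per_line
instance (cards : List String) (card_per_line : Int) (max_symbols_per_line : Int) : Decidable (Pre_print_cards cards card_per_line max_symbols_per_line) := by unfold Pre_print_cards; infer_instance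

def pvWitness_print_cards : List String × Int × Int := (["ab\ncd", "e"], 2, 50)

def Spec_print_cards (cards : List String) (card_per_line : Int) (max_symbols_per_line : Int) (out : String) : Prop := out = print_cards_alt cards card_per_line max_symbols_per_line
instance (cards : List String) (card_per_line : Int) (max_symbols_per_line : Int) (out : String) : Decidable (Spec_print_cards cards card_per_line max_symbols_per_line out) := by unfold Spec_print_cards; infer_instance

-- ===== CLAIM (what is proved, stated in full; the proofs are below) =====
def Claim_equal_print_cards : Prop := ∀ (cards : List String) (card_per_line : Int) (max_symbols_per_line : Int), Dom_print_cards cards card_per_line max_symbols_per_line → Pre_print_cards cards card_per_line max_symbols_per_line → Spec_print_cards cards card_per_line max_symbols_per_line (print_cards cards card_per_line max_symbols_per_line)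

-- ===== LEMMAS AND PROOFS =====

-- proof-side normal form: the rows contributed by one chunk `start`, with newlines attached
def pvChunkN (padded : List (List (List Char))) (blankBlock : List (List Char))
    (n maxLen maxLines cpl start : Int) : List (List Char) :=
  let chunk := (PySem.List.pyRange 0 cpl 1).map (fun j =>
    if start + j < n then (PySem.List.pyGet? padded (start + j)).getD [] else blankBlock)
  ((PySem.List.pyRange 0 maxLines 1).map (fun i =>
    ('|' :: PySem.Chars.join ['|']
        (chunk.map (fun block => (PySem.List.pyGet? block i).getD []))) ++ ['|', '\n']))
  ++ [pvBorder maxLen cpl]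

theorem pv_go_ne_nil (sep : List Char) :
    ∀ (fuel : Nat) (l cur : List Char) (acc : List (List Char)),
      PySem.Chars.splitOn.go sep fuel l cur acc ≠ [] := by
  intro fuel
  induction fuel with
  | zero => intro l cur acc; simp [PySem.Chars.splitOn.go]
  | succ n ih =>
    intro l cur acc
    cases l with
    | nil => simp [PySem.Chars.splitOn.go]
    | cons c rest =>
      rw [PySem.Chars.splitOn.go]
      split
      · exact ih _ _ _
      · exact ih _ _ _

theorem pv_splitOn_ne_nil (s sep : List Char) : PySem.Chars.splitOn s sep ≠ [] := by
  exact pv_go_ne_nil sep _ _ _ _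

theorem pv_pyRange_pos_nil (a b s : Int) (hs : 0 < s) (hab : ¬ a < b) :
    PySem.List.pyRange a b s = [] := by
  rw [PySem.List.pyRange_of_pos _ _ hs, if_neg hab]
  simp

theorem pv_pyRange_pos_cons (a b s : Int) (hs : 0 < s) (hab : a < b) :
    PySem.List.pyRange a b s = a :: PySem.List.pyRange (a + s) b s := by
  rw [PySem.List.pyRange_of_pos _ _ hs, PySem.List.pyRange_of_pos _ _ hs, if_pos hab]
  have key : ((b - a + s - 1) / s).toNat = ((b - (a + s) + s - 1) / s).toNat + 1 := by
    have h1 : b - a + s - 1 = (b - (a + s) + s - 1) + 1 * s := by ring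
    rw [h1, Int.add_mul_ediv_right _ _ (by omega)]
    have h2 : 0 ≤ (b - (a + s) + s - 1) / s := Int.ediv_nonneg (by omega) (by omega)
    omega
  by_cases h2 : a + s < b
  · rw [if_pos h2, key, List.range_succ_eq_map]
    simp only [List.map_cons, List.map_map]
    congr 1
    · simp
    apply List.map_congr_left
    intro k _
    simp [Function.comp]
    ring
  · rw [if_neg h2, key]
    have h3 : (b - (a + s) + s - 1) / s = 0 := Int.ediv_eq_zero_of_lt (by omega) (by omega)
    rw [h3]
    simp

theorem pv_foldl_max_flatten (bs : List (List Int)) (h : ∀ b ∈ bs, b ≠ []) :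
    ∀ (a : Int), bs.flatten.foldl max a
      = (bs.map (fun b => (PySem.List.max? b (fun x => x)).getD 0)).foldl max a := by
  induction bs with
  | nil => intro a; simp
  | cons b bs ih =>
    intro a
    match b, h b (by simp) with
    | x :: t, _ =>
      simp only [List.flatten_cons, List.foldl_append, List.map_cons, List.foldl_cons,
        PySem.List.max?_id_cons, Option.getD_some]
      rw [ih (fun b hb => h b (by simp [hb]))]
      congr 1
      exact List.foldl_assoc (op := (max : Int → Int → Int))

theorem pv_max_flat (bs : List (List Int)) (h : ∀ b ∈ bs, b ≠ []) :
    (PySem.List.max? (bs.flatMap (fun b => b)) (fun x => x)).getD 0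
      = (PySem.List.max? (bs.map (fun b => (PySem.List.max? b (fun x => x)).getD 0)) (fun x => x)).getD 0 := by
  cases bs with
  | nil => simp
  | cons b bs =>
    match b, h b (by simp) with
    | x :: t, _ =>
      simp only [List.flatMap_cons, List.cons_append, List.map_cons, PySem.List.max?_id_cons,
        Option.getD_some]
      rw [List.foldl_append]
      have hflat : bs.flatMap (fun b => b) = bs.flatten := by simp [List.flatMap_def]
      rw [hflat, pv_foldl_max_flatten bs (fun b hb => h b (by simp [hb]))]

theorem pv_intercalate_pipe (p : Char) :
    ∀ (cs : List (List Char)), cs ≠ [] →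
      List.intercalate [p] cs ++ [p] = cs.flatMap (fun c => c ++ [p]) := by
  intro cs
  induction cs with
  | nil => simp
  | cons c cs ih =>
    intro _
    cases cs with
    | nil => simp [List.intercalate]
    | cons d ds =>
      have ihh := ih (by simp)
      simp only [List.intercalate, List.intersperse] at ihh ⊢
      simp only [List.flatten_cons, List.flatMap_cons] at ihh ⊢
      rw [← ihh]
      simp

theorem pv_cell_eq (split : List (List (List Char))) (maxLen maxLines printed j i : Int)
    (hlines : ∀ b ∈ split, PySem.List.len b ≤ maxLines)
    (hpr : 0 ≤ printed) (hj : 0 ≤ j) (hi : 0 ≤ i) (hiM : i < maxLines) :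
    (PySem.List.pyGet? (if printed + j < PySem.List.len split then
        (PySem.List.pyGet? (split.map (fun b => b.map (pvPadLine maxLen)
            ++ PySem.List.pyRepeat [pvSpaces (maxLen + 2)] (maxLines - PySem.List.len b))) (printed + j)).getD []
      else PySem.List.pyRepeat [pvSpaces (maxLen + 2)] maxLines) i).getD []
    = pvCellA split (PySem.List.len split) maxLen printed j i := by
  have hM0 : (0:Int) ≤ maxLines := le_of_lt (lt_of_le_of_lt hi hiM)
  by_cases hlt : printed + j < PySem.List.len split
  · simp only [if_pos hlt, pvCellA]
    have hidxnat : (printed + j).toNat < split.length := by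
      simp only [PySem.List.len_eq] at hlt; omega
    rw [PySem.List.pyGet?_of_nonneg _ (by omega : (0:Int) ≤ printed + j), PySem.List.pyGet?_of_nonneg _ (by omega : (0:Int) ≤ printed + j),
        List.getElem?_map, List.getElem?_eq_getElem hidxnat]
    simp only [Option.map_some, Option.getD_some]
    set b := split[(printed + j).toNat] with hb
    have hbmem : b ∈ split := by exact List.getElem_mem hidxnat
    have hbM : PySem.List.len b ≤ maxLines := hlines b hbmem
    by_cases hib : i < PySem.List.len b
    · rw [if_pos hib, PySem.List.pyGet?_of_nonneg _ hi, PySem.List.pyGet?_of_nonneg _ hi]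
      have hinat : i.toNat < b.length := by simp only [PySem.List.len_eq] at hib; omega
      rw [List.getElem?_append_left (by simpa using hinat), List.getElem?_map,
          List.getElem?_eq_getElem hinat]
      simp [pvPadLine]
    · rw [if_neg hib, PySem.List.pyGet?_of_nonneg _ hi]
      have hige : b.length ≤ i.toNat := by simp only [PySem.List.len_eq] at hib; omega
      rw [PySem.List.pyRepeat_singleton,
          List.getElem?_append_right (by simpa using hige)]
      have hrange : i.toNat - (b.map (pvPadLine maxLen)).length < (maxLines - PySem.List.len b).toNat := by
        simp only [List.length_map, PySem.List.len_eq] at *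
        omega
      rw [List.getElem?_eq_getElem (by simpa using hrange), List.getElem_replicate]
      simp
  · simp only [if_neg hlt, pvCellA]
    rw [PySem.List.pyGet?_of_nonneg _ hi, PySem.List.pyRepeat_singleton]
    have hrange : i.toNat < maxLines.toNat := by omega
    rw [List.getElem?_eq_getElem (by simpa using hrange), List.getElem_replicate]
    simp

theorem pv_chunk_eq (split : List (List (List Char))) (maxLen maxLines cpl printed : Int)
    (acc : List Char) (hcpl : 0 < cpl) (hpr : 0 ≤ printed)
    (hlines : ∀ b ∈ split, PySem.List.len b ≤ maxLines) :
    pvChunkA split (PySem.List.len split) maxLen maxLines cpl printed acc ++ pvBorder maxLen cpl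
      = acc ++ (pvChunkN
          (split.map (fun b => b.map (pvPadLine maxLen)
              ++ PySem.List.pyRepeat [pvSpaces (maxLen + 2)] (maxLines - PySem.List.len b)))
          (PySem.List.pyRepeat [pvSpaces (maxLen + 2)] maxLines)
          (PySem.List.len split) maxLen maxLines cpl printed).flatten := by
  unfold pvChunkA pvChunkN
  rw [List.flatten_append]
  simp only [List.flatten_cons, List.flatten_nil, List.append_nil]
  rw [← List.flatMap_def]
  have hA : ∀ (acc0 : List Char),
      (PySem.List.pyRange 0 maxLines 1).foldl (fun acc i =>
        ((PySem.List.pyRange 0 cpl 1).foldl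
            (fun acc j => acc ++ pvCellA split (PySem.List.len split) maxLen printed j i ++ ['|'])
            (acc ++ ['|'])) ++ ['\n']) acc0
      = acc0 ++ (PySem.List.pyRange 0 maxLines 1).flatMap (fun i =>
          '|' :: ((PySem.List.pyRange 0 cpl 1).flatMap
              (fun j => pvCellA split (PySem.List.len split) maxLen printed j i ++ ['|']) ++ ['\n'])) := by
    intro acc0
    have hbody : ∀ (acc1 : List Char) (i : Int),
        ((PySem.List.pyRange 0 cpl 1).foldl
            (fun acc j => acc ++ pvCellA split (PySem.List.len split) maxLen printed j i ++ ['|'])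
            (acc1 ++ ['|'])) ++ ['\n']
        = acc1 ++ ('|' :: ((PySem.List.pyRange 0 cpl 1).flatMap
              (fun j => pvCellA split (PySem.List.len split) maxLen printed j i ++ ['|']) ++ ['\n'])) := by
      intro acc1 i
      have := PySem.List.foldl_append_eq_flatMap
        (g := fun j => pvCellA split (PySem.List.len split) maxLen printed j i ++ ['|'])
        (l := PySem.List.pyRange 0 cpl 1) (acc := acc1 ++ ['|'])
      simp only [List.append_assoc] at this ⊢
      rw [this]
      simp
    calc (PySem.List.pyRange 0 maxLines 1).foldl (fun acc i =>
        ((PySem.List.pyRange 0 cpl 1).foldl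
            (fun acc j => acc ++ pvCellA split (PySem.List.len split) maxLen printed j i ++ ['|'])
            (acc ++ ['|'])) ++ ['\n']) acc0
        = (PySem.List.pyRange 0 maxLines 1).foldl (fun acc i =>
            acc ++ ('|' :: ((PySem.List.pyRange 0 cpl 1).flatMap
              (fun j => pvCellA split (PySem.List.len split) maxLen printed j i ++ ['|']) ++ ['\n']))) acc0 := by
          apply PySem.List.foldl_congr_mem
          intro acc1 i _
          exact hbody acc1 i
      _ = _ := PySem.List.foldl_append_eq_flatMap ..
  rw [hA, List.append_assoc]
  congr 1
  congr 1
  rw [List.flatMap_def, List.flatMap_def]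
  congr 1
  apply List.map_congr_left
  intro i hi
  have hi' := PySem.List.mem_pyRange_one.mp hi
  symm
  have hcells : ((PySem.List.pyRange 0 cpl 1).map (fun j =>
      if printed + j < PySem.List.len split then
        (PySem.List.pyGet? (split.map (fun b => b.map (pvPadLine maxLen)
            ++ PySem.List.pyRepeat [pvSpaces (maxLen + 2)] (maxLines - PySem.List.len b))) (printed + j)).getD []
      else PySem.List.pyRepeat [pvSpaces (maxLen + 2)] maxLines)).map
        (fun block => (PySem.List.pyGet? block i).getD []) ≠ [] := by
    simp only [ne_eq, List.map_eq_nil_iff]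
    intro hnil
    have := congrArg List.length hnil
    rw [PySem.List.length_pyRange_one] at this
    simp at this
    omega
  simp only [PySem.Chars.join]
  have hjoin := pv_intercalate_pipe '|' _ hcells
  have hrow : ('|' :: List.intercalate ['|'] (((PySem.List.pyRange 0 cpl 1).map (fun j =>
      if printed + j < PySem.List.len split then
        (PySem.List.pyGet? (split.map (fun b => b.map (pvPadLine maxLen)
            ++ PySem.List.pyRepeat [pvSpaces (maxLen + 2)] (maxLines - PySem.List.len b))) (printed + j)).getD []
      else PySem.List.pyRepeat [pvSpaces (maxLen + 2)] maxLines)).map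
        (fun block => (PySem.List.pyGet? block i).getD []))) ++ ['|', '\n']
      = '|' :: ((((PySem.List.pyRange 0 cpl 1).map (fun j =>
      if printed + j < PySem.List.len split then
        (PySem.List.pyGet? (split.map (fun b => b.map (pvPadLine maxLen)
            ++ PySem.List.pyRepeat [pvSpaces (maxLen + 2)] (maxLines - PySem.List.len b))) (printed + j)).getD []
      else PySem.List.pyRepeat [pvSpaces (maxLen + 2)] maxLines)).map
        (fun block => (PySem.List.pyGet? block i).getD [])).flatMap (fun c => c ++ ['|']) ++ ['\n']) := by
    rw [← hjoin]; simp
  rw [hrow]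
  congr 1
  simp only [List.flatMap_def, List.map_map]
  congr 1
  congr 1
  apply List.map_congr_left
  intro j hj
  simp only [Function.comp]
  have hj' := PySem.List.mem_pyRange_one.mp hj
  congr 1
  exact pv_cell_eq split maxLen maxLines printed j i hlines hpr hj'.1 hi'.1 hi'.2

theorem pv_loop_eq (split : List (List (List Char))) (maxLen maxLines cpl : Int)
    (hcpl : 0 < cpl) (hlines : ∀ b ∈ split, PySem.List.len b ≤ maxLines) :
    ∀ (k : Nat) (printed : Int) (acc : List Char), 0 ≤ printed →
      (PySem.List.len split - printed).toNat ≤ k →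
      pvLoopA split (PySem.List.len split) maxLen maxLines cpl printed acc
        = acc ++ ((PySem.List.pyRange printed (PySem.List.len split) cpl).flatMap
            (fun start => (pvChunkN
              (split.map (fun b => b.map (pvPadLine maxLen)
                  ++ PySem.List.pyRepeat [pvSpaces (maxLen + 2)] (maxLines - PySem.List.len b)))
              (PySem.List.pyRepeat [pvSpaces (maxLen + 2)] maxLines)
              (PySem.List.len split) maxLen maxLines cpl start).flatten)) := by
  intro k
  induction k with
  | zero =>
    intro printed acc h0 hk
    have hn : ¬ printed < PySem.List.len split := by
      simp only [PySem.List.len_eq] at hk ⊢; omega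
    rw [pvLoopA, dif_neg (by tauto), pv_pyRange_pos_nil _ _ _ hcpl hn]
    simp
  | succ k ih =>
    intro printed acc h0 hk
    by_cases h : printed < PySem.List.len split
    · rw [pvLoopA, dif_pos ⟨h, hcpl⟩]
      rw [ih (printed + cpl) _ (by omega) (by simp only [PySem.List.len_eq] at hk ⊢; omega)]
      rw [pv_chunk_eq split maxLen maxLines cpl printed acc hcpl h0 hlines]
      rw [pv_pyRange_pos_cons printed (PySem.List.len split) cpl hcpl h]
      rw [List.flatMap_cons, List.append_assoc]
    · rw [pvLoopA, dif_neg (by tauto), pv_pyRange_pos_nil _ _ _ hcpl h]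
      simp

-- ---- B-side bridging lemmas ----

-- zip(*rs) on equal-length rectangles is index-wise transposition
theorem pv_zipStar_eq : ∀ (m : Nat) (rs : List (List (List Char))), rs ≠ [] →
    (∀ r ∈ rs, r.length = m) →
    pvZipStar rs = (List.range m).map (fun i => rs.map (fun r => (r[i]?).getD [])) := by
  intro m
  induction m with
  | zero =>
    intro rs hne hlen
    rw [pvZipStar]
    rw [dif_neg]
    · simp
    · rintro ⟨h1, h2⟩
      match rs, hne with
      | r :: t, _ =>
        have := hlen r (by simp)
        have := h2 r (by simp)
        simp_all [List.length_eq_zero_iff]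
  | succ m ih =>
    intro rs hne hlen
    rw [pvZipStar, dif_pos]
    · rw [ih (rs.map List.tail) (by simpa using hne)
          (by intro r hr; simp only [List.mem_map] at hr; obtain ⟨r0, hr0, rfl⟩ := hr
              have := hlen r0 hr0; simp [List.length_tail, this])]
      rw [List.range_succ_eq_map]
      simp only [List.map_cons, List.map_map]
      congr 1
      · apply List.map_congr_left
        intro r hr
        have hl := hlen r hr
        match r, hl with
        | a :: as, _ => simp
      · apply List.map_congr_left
        intro i _
        simp only [Function.comp]
        apply List.map_congr_left
        intro r hr
        have hl := hlen r hr
        match r, hl with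
        | a :: as, _ => simp
    · constructor
      · exact hne
      · intro r hr
        have := hlen r hr
        intro hnil
        rw [hnil] at this
        simp at this

-- "|".join([""] + row + [""]) = "|" + "|".join(row) + "|"  (row nonempty)
theorem pv_inter_cc (p : Char) (a b : List Char) (l : List (List Char)) :
    List.intercalate [p] (a :: b :: l) = a ++ [p] ++ List.intercalate [p] (b :: l) := by
  simp [List.intercalate, List.intersperse]

theorem pv_inter_tail (p : Char) :
    ∀ (l : List (List Char)) (a : List Char),
      List.intercalate [p] ((a :: l) ++ [[]]) = List.intercalate [p] (a :: l) ++ [p] := by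
  intro l
  induction l with
  | nil => intro a; simp [List.intercalate, List.intersperse]
  | cons b t ihl =>
    intro a
    rw [List.cons_append, List.cons_append, pv_inter_cc, ← List.cons_append, ihl b,
        pv_inter_cc]
    simp

theorem pv_join_wrap (p : Char) (row : List (List Char)) (h : row ≠ []) :
    PySem.Chars.join [p] ([[]] ++ row ++ [[]])
      = (p :: PySem.Chars.join [p] row) ++ [p] := by
  simp only [PySem.Chars.join]
  match row, h with
  | r :: rest, _ =>
    have h1 : ([[]] ++ (r :: rest) ++ [[]] : List (List Char))
        = [] :: ((r :: rest) ++ [[]]) := by simp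
    rw [h1, show ((r :: rest) ++ [[]] : List (List Char)) = r :: (rest ++ [[]]) from by simp,
        pv_inter_cc, ← List.cons_append, pv_inter_tail]
    simp

-- rects[s:s+cpl] padded with blanks = the index-guarded chunk selection
theorem pv_slice_pad (rects : List (List (List Char))) (blank : List (List Char)) :
    ∀ (m s : Nat),
      (rects.drop s).take m ++ List.replicate (m - ((rects.drop s).take m).length) blank
        = (List.range m).map (fun j => if hs : s + j < rects.length then rects[s + j] else blank) := by
  intro m
  induction m with
  | zero => intro s; simp
  | succ m ih =>
    intro s
    by_cases h : s < rects.length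
    · have hdrop : rects.drop s = rects[s] :: rects.drop (s + 1) := (List.getElem_cons_drop h).symm
      rw [hdrop]
      simp only [List.take_succ_cons, List.length_cons, List.range_succ_eq_map, List.map_cons]
      rw [dif_pos (by omega : s + 0 < rects.length)]
      simp only [Nat.add_zero]
      have : (m + 1) - ((rects.drop (s+1)).take m).length - 1 + 1
          = m + 1 - (((rects.drop (s+1)).take m).length + 1) + 1 - 1 + 1 := by omega
      have hrep : (m + 1) - (((rects.drop (s+1)).take m).length + 1)
          = m - ((rects.drop (s+1)).take m).length := by omega
      rw [List.cons_append, hrep, ih (s+1)]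
      congr 1
      simp only [List.map_map]
      apply List.map_congr_left
      intro k _
      simp only [Function.comp, Nat.succ_eq_add_one]
      have : s + 1 + k = s + (k + 1) := by omega
      rw [this]
    · have hdrop : rects.drop s = [] := List.drop_eq_nil_of_le (by omega)
      rw [hdrop]
      simp only [List.take_nil, List.nil_append, List.length_nil, Nat.sub_zero]
      symm
      calc (List.range (m+1)).map (fun j => if hs : s + j < rects.length then rects[s + j] else blank)
          = (List.range (m+1)).map (fun _ => blank) := by
            apply List.map_congr_left
            intro j _
            rw [dif_neg (by omega)]
        _ = List.replicate (m+1) blank := by simp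

theorem pv_pyRange_nonneg (b : Int) (hb : 0 ≤ b) :
    PySem.List.pyRange 0 b 1 = (List.range b.toNat).map (fun k : Nat => (k : Int)) := by
  have := PySem.List.pyRange_zero_natCast b.toNat
  rwa [Int.toNat_of_nonneg hb] at this

-- one chunk of B's line list equals the normal-form chunk rows (minus/plus newline bookkeeping)
theorem pv_chunkB_eq (rects : List (List (List Char))) (maxLen maxLines cpl s : Int)
    (hcpl : 0 < cpl) (hs : 0 ≤ s) (hM : 0 ≤ maxLines)
    (hrl : ∀ r ∈ rects, r.length = maxLines.toNat) :
    ((pvZipStar (PySem.List.slice rects (some s) (some (s + cpl))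
        ++ PySem.List.pyRepeat [PySem.List.pyRepeat [pvSpaces (maxLen + 2)] maxLines]
            (cpl - PySem.List.len (PySem.List.slice rects (some s) (some (s + cpl)))))).map
        (fun row => PySem.Chars.join ['|'] ([[]] ++ row ++ [[]]))).map (fun l => l ++ ['\n'])
      ++ [pvBorderB maxLen cpl ++ ['\n']]
    = pvChunkN rects (PySem.List.pyRepeat [pvSpaces (maxLen + 2)] maxLines)
        (PySem.List.len rects) maxLen maxLines cpl s := by
  have hblanklen : (PySem.List.pyRepeat [pvSpaces (maxLen + 2)] maxLines).length = maxLines.toNat := by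
    rw [PySem.List.pyRepeat_singleton]; simp
  set blank := PySem.List.pyRepeat [pvSpaces (maxLen + 2)] maxLines with hblank
  -- the argument of pvZipStar is the index-guarded chunk
  have hslice : PySem.List.slice rects (some s) (some (s + cpl))
      = (rects.drop s.toNat).take cpl.toNat := by
    rw [PySem.List.slice_toNat rects hs (by omega)]
    congr 1
    omega
  have hpad : PySem.List.pyRepeat [blank]
        (cpl - PySem.List.len (PySem.List.slice rects (some s) (some (s + cpl))))
      = List.replicate (cpl.toNat - (PySem.List.slice rects (some s) (some (s + cpl))).length) blank := by
    rw [PySem.List.pyRepeat_singleton]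
    congr 1
    simp only [PySem.List.len_eq]
    omega
  have hargs : PySem.List.slice rects (some s) (some (s + cpl))
        ++ PySem.List.pyRepeat [blank]
            (cpl - PySem.List.len (PySem.List.slice rects (some s) (some (s + cpl))))
      = (List.range cpl.toNat).map
          (fun j => if hs : s.toNat + j < rects.length then rects[s.toNat + j] else blank) := by
    rw [hpad, hslice]
    exact pv_slice_pad rects blank cpl.toNat s.toNat
  rw [hargs]
  -- all members have length maxLines.toNat
  have hmemlen : ∀ r ∈ (List.range cpl.toNat).map
      (fun j => if hs : s.toNat + j < rects.length then rects[s.toNat + j] else blank),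
      r.length = maxLines.toNat := by
    intro r hr
    simp only [List.mem_map] at hr
    obtain ⟨j, _, rfl⟩ := hr
    split
    · exact hrl _ (List.getElem_mem _)
    · exact hblanklen
  have hne : (List.range cpl.toNat).map
      (fun j => if hs : s.toNat + j < rects.length then rects[s.toNat + j] else blank) ≠ [] := by
    simp only [ne_eq, List.map_eq_nil_iff, List.range_eq_nil]
    omega
  rw [pv_zipStar_eq maxLines.toNat _ hne hmemlen]
  -- now both sides are maps over the row index
  unfold pvChunkN
  congr 1
  rw [pv_pyRange_nonneg maxLines hM]
  simp only [List.map_map]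
  apply List.map_congr_left
  intro i hi
  simp only [Function.comp]
  have hiM : i < maxLines.toNat := by simpa using hi
  -- the cells of row i agree
  have hcellrow : ((List.range cpl.toNat).map
        (fun j => if hs : s.toNat + j < rects.length then rects[s.toNat + j] else blank)).map
          (fun r => (r[i]?).getD [])
      = ((PySem.List.pyRange 0 cpl 1).map (fun j =>
          if s + j < PySem.List.len rects then (PySem.List.pyGet? rects (s + j)).getD [] else blank)).map
          (fun block => (PySem.List.pyGet? block (i : Int)).getD []) := by
    rw [pv_pyRange_nonneg cpl (le_of_lt hcpl)]
    simp only [List.map_map]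
    apply List.map_congr_left
    intro j hj
    simp only [Function.comp]
    have hjc : (0:Int) ≤ (j:Int) := by positivity
    -- identify the selected block
    have hblockeq : (if hs : s.toNat + j < rects.length then rects[s.toNat + j] else blank)
        = (if s + (j:Int) < PySem.List.len rects then (PySem.List.pyGet? rects (s + j)).getD [] else blank) := by
      by_cases hin : s.toNat + j < rects.length
      · rw [dif_pos hin, if_pos (by simp only [PySem.List.len_eq]; omega)]
        rw [PySem.List.pyGet?_of_nonneg _ (by omega : (0:Int) ≤ s + j)]
        have : (s + (j:Int)).toNat = s.toNat + j := by omega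
        rw [this, List.getElem?_eq_getElem hin]
        simp
      · rw [dif_neg hin, if_neg (by simp only [PySem.List.len_eq]; omega)]
    rw [hblockeq]
    -- then extract row i
    set block := (if s + (j:Int) < PySem.List.len rects then (PySem.List.pyGet? rects (s + j)).getD [] else blank) with hbl
    have hblen : block.length = maxLines.toNat := by
      rw [hbl]
      split
      · rw [PySem.List.pyGet?_of_nonneg _ (by omega : (0:Int) ≤ s + j)]
        rename_i hlt
        simp only [PySem.List.len_eq] at hlt
        have hlt' : (s + (j:Int)).toNat < rects.length := by omega
        rw [List.getElem?_eq_getElem hlt']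
        simp only [Option.getD_some]
        exact hrl _ (List.getElem_mem _)
      · exact hblanklen
    rw [PySem.List.pyGet?_of_nonneg _ (by positivity : (0:Int) ≤ (i:Int))]
    have : ((i:Int)).toNat = i := by omega
    rw [this]
  simp only [← List.map_map]
  rw [hcellrow]
  -- wrap with pipes and newline
  have hrowne : ((PySem.List.pyRange 0 cpl 1).map (fun j =>
      if s + j < PySem.List.len rects then (PySem.List.pyGet? rects (s + j)).getD [] else blank)).map
        (fun block => (PySem.List.pyGet? block (i : Int)).getD []) ≠ [] := by
    simp only [ne_eq, List.map_eq_nil_iff]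
    intro hnil
    have := congrArg List.length hnil
    rw [PySem.List.length_pyRange_one] at this
    simp at this
    omega
  rw [pv_join_wrap '|' _ hrowne]
  simp

-- final "\n".join(lines) + "\n" over a nonempty line list appends "\n" to every line
theorem pv_join_newlines (lines : List (List Char)) (h : lines ≠ []) :
    PySem.Chars.join ['\n'] lines ++ ['\n'] = lines.flatMap (fun l => l ++ ['\n']) := by
  simp only [PySem.Chars.join]
  exact pv_intercalate_pipe '\n' lines h

-- ===== VERDICT (by name: the statement is the Claim_ definition above) =====
theorem print_cards_spec : Claim_equal_print_cards := by
  intro cards cpl msl _hdom hpre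
  obtain ⟨hne, hcpl⟩ := hpre
  have hcpl' : (0:Int) < cpl := by omega
  unfold Spec_print_cards print_cards print_cards_alt
  dsimp only
  have hA1 : ((cards.map String.toList).map (fun s => PySem.Chars.splitOn s ['\n'])).map
      (fun b => b.map (fun l => PySem.List.slice l none (some msl)))
      = cards.map (fun card => (PySem.Chars.splitOn card.toList ['\n']).map
          (fun l => PySem.List.slice l none (some msl))) := by
    simp [List.map_map, Function.comp]
  rw [hA1]
  set split := cards.map (fun card => (PySem.Chars.splitOn card.toList ['\n']).map
      (fun l => PySem.List.slice l none (some msl))) with hsplit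
  -- the two max_length computations agree
  have hbne : ∀ b ∈ split.map (fun b => b.map pvGDW), b ≠ [] := by
    intro b hb
    simp only [hsplit, List.map_map, List.mem_map] at hb
    obtain ⟨c, _, rfl⟩ := hb
    simp only [Function.comp, ne_eq, List.map_eq_nil_iff]
    exact pv_splitOn_ne_nil _ _
  have hmax := pv_max_flat (split.map (fun b => b.map pvGDW)) hbne
  have hflat : (split.map (fun b => b.map pvGDW)).flatMap (fun b => b)
      = split.flatMap (fun b => b.map pvGDW) := by
    simp only [List.flatMap_def, List.map_map]
    rfl
  have hmaps : (split.map (fun b => b.map pvGDW)).map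
        (fun b => (PySem.List.max? b (fun x => x)).getD 0)
      = split.map (fun b => (PySem.List.max? (b.map pvGDW) (fun x => x)).getD 0) := by
    simp [List.map_map]
  rw [hflat, hmaps] at hmax
  rw [← hmax]
  set maxLen := (PySem.List.max? (split.flatMap (fun b => b.map pvGDW)) (fun x => x)).getD 0
  set maxLines := (PySem.List.max? (split.map (fun b => PySem.List.len b)) (fun x => x)).getD 0
    with hmaxLines
  -- every block has at most maxLines lines, and maxLines ≥ 1
  have hsne : split ≠ [] := by simp [hsplit]; exact hne
  have hlines : ∀ b ∈ split, PySem.List.len b ≤ maxLines := by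
    intro b hb
    obtain ⟨m, hm⟩ : ∃ m, PySem.List.max? (split.map (fun b => PySem.List.len b)) (fun x => x)
        = some m := by
      cases hmm : PySem.List.max? (split.map (fun b => PySem.List.len b)) (fun x => x) with
      | none => rw [PySem.List.max?_eq_none_iff, List.map_eq_nil_iff] at hmm; exact absurd hmm hsne
      | some m => exact ⟨m, rfl⟩
    have := PySem.List.max?_isMax hm (PySem.List.len b) (by exact List.mem_map_of_mem hb)
    rw [hmaxLines, hm]
    simpa using this
  have hM0 : (0:Int) ≤ maxLines := by
    obtain ⟨b, hb⟩ := List.exists_mem_of_ne_nil _ hsne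
    have hble := hlines b hb
    have hb0 : (0:Int) ≤ PySem.List.len b := by simp [PySem.List.len_eq]
    omega
  have hlen : PySem.List.len cards = PySem.List.len split := by
    simp [PySem.List.len_eq, hsplit]
  rw [hlen]
  -- reduce A to the normal form
  rw [pv_loop_eq split maxLen maxLines cpl hcpl' hlines ((PySem.List.len split).toNat) 0
      (pvBorder maxLen cpl) le_rfl (by omega)]
  -- reduce B to the same normal form
  set rects := split.map (fun b => b.map (pvPadLine maxLen)
      ++ PySem.List.pyRepeat [pvSpaces (maxLen + 2)] (maxLines - PySem.List.len b)) with hrects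
  have hrl : ∀ r ∈ rects, r.length = maxLines.toNat := by
    intro r hr
    simp only [hrects, List.mem_map] at hr
    obtain ⟨b, hb, rfl⟩ := hr
    have hble := hlines b hb
    rw [PySem.List.pyRepeat_singleton]
    simp only [List.length_append, List.length_map, List.length_replicate]
    simp only [PySem.List.len_eq] at hble ⊢
    omega
  have hlenr : PySem.List.len split = PySem.List.len rects := by
    simp [PySem.List.len_eq, hrects]
  -- B's foldl over chunk starts as a flatMap
  have hfold : ∀ (init : List (List Char)),
      (PySem.List.pyRange 0 (PySem.List.len split) cpl).foldl
        (fun lines s =>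
          (lines ++ (pvZipStar (PySem.List.slice rects (some s) (some (s + cpl))
              ++ PySem.List.pyRepeat [PySem.List.pyRepeat [pvSpaces (maxLen + 2)] maxLines]
                  (cpl - PySem.List.len (PySem.List.slice rects (some s) (some (s + cpl)))))).map
              (fun row => PySem.Chars.join ['|'] ([[]] ++ row ++ [[]]))) ++ [pvBorderB maxLen cpl])
        init
      = init ++ (PySem.List.pyRange 0 (PySem.List.len split) cpl).flatMap
          (fun s => ((pvZipStar (PySem.List.slice rects (some s) (some (s + cpl))
              ++ PySem.List.pyRepeat [PySem.List.pyRepeat [pvSpaces (maxLen + 2)] maxLines]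
                  (cpl - PySem.List.len (PySem.List.slice rects (some s) (some (s + cpl)))))).map
              (fun row => PySem.Chars.join ['|'] ([[]] ++ row ++ [[]]))) ++ [pvBorderB maxLen cpl]) := by
    intro init
    refine Eq.trans (PySem.List.foldl_congr_mem _ _
        (fun lines s => lines ++ (((pvZipStar (PySem.List.slice rects (some s) (some (s + cpl))
              ++ PySem.List.pyRepeat [PySem.List.pyRepeat [pvSpaces (maxLen + 2)] maxLines]
                  (cpl - PySem.List.len (PySem.List.slice rects (some s) (some (s + cpl)))))).map
              (fun row => PySem.Chars.join ['|'] ([[]] ++ row ++ [[]]))) ++ [pvBorderB maxLen cpl]))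
        init ?_) (PySem.List.foldl_append_eq_flatMap ..)
    intro acc s _
    rw [List.append_assoc]
  rw [hfold]
  -- append the trailing newline through the join
  have hlinesne : ([pvBorderB maxLen cpl] ++ (PySem.List.pyRange 0 (PySem.List.len split) cpl).flatMap
      (fun s => ((pvZipStar (PySem.List.slice rects (some s) (some (s + cpl))
          ++ PySem.List.pyRepeat [PySem.List.pyRepeat [pvSpaces (maxLen + 2)] maxLines]
              (cpl - PySem.List.len (PySem.List.slice rects (some s) (some (s + cpl)))))).map
          (fun row => PySem.Chars.join ['|'] ([[]] ++ row ++ [[]]))) ++ [pvBorderB maxLen cpl]))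
      ≠ ([] : List (List Char)) := by
    simp
  rw [pv_join_newlines _ hlinesne]
  -- distribute the newline over the line list and match chunk by chunk
  rw [List.flatMap_append, List.flatMap_assoc]
  have hhead : ([pvBorderB maxLen cpl] : List (List Char)).flatMap (fun l => l ++ ['\n'])
      = pvBorder maxLen cpl := by
    simp [pvBorderB, pvBorder]
  rw [hhead]
  congr 1
  rw [List.flatMap_def, List.flatMap_def]
  congr 1
  congr 1
  apply List.map_congr_left
  intro s hs
  have hs0 : 0 ≤ s := ((PySem.List.mem_pyRange_iff_of_pos hcpl' s).mp hs).1
  have hkey := pv_chunkB_eq rects maxLen maxLines cpl s hcpl' hs0 hM0 hrl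
  rw [hlenr, ← hkey]
  simp [List.flatten_append, List.flatMap_def]
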